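-- pv_equiv track=rewrite | github.com/Osg523/coding_practiceOsg | 프로그래머스/0/181881. 조건에 맞게 수열 변환하기 2/조건에 맞게 수열 변환하기 2.py | solution
-- ===== SOURCE A (Python) =====
-- def solution(arr):
--     answer = -1
--     arr2 = []
--     while arr != arr2:
--         arr2 = [i for i in arr]
--         answer += 1
--         for i, j in enumerate(arr):
--             if j >= 50 and not j%2:
--                 arr[i] = j//2
--             elif j < 50 and j%2:
--                 arr[i] = j*2 + 1
--     return answer
-- ===== SOURCE B (Python) =====
-- def solution(arr):
--     # per-element convergence instead of whole-array rounds; mutates arr in place like A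
--     if not arr:
--         return -1
--     best = 0
--     for i in range(len(arr)):
--         j = arr[i]
--         c = 0
--         while True:
--             if j >= 50 and j % 2 == 0:
--                 nj = j // 2
--             elif j < 50 and j % 2 == 1:
--                 nj = j * 2 + 1
--             else:
--                 nj = j
--             if nj == j:
--                 break
--             j = nj
--             c += 1
--         arr[i] = j
--         best = max(best, c)
--     return best
-- ===== Notes on version B (the rewrite author's own statement) =====
-- stated objective: alternative
-- what changed: Replaces repeated whole-array passes with copy-and-compare by a single pass that converges each element independently with an inner while-loop and returns the maximum per-element step count (-1 for empty input).
import Mathlib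
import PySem

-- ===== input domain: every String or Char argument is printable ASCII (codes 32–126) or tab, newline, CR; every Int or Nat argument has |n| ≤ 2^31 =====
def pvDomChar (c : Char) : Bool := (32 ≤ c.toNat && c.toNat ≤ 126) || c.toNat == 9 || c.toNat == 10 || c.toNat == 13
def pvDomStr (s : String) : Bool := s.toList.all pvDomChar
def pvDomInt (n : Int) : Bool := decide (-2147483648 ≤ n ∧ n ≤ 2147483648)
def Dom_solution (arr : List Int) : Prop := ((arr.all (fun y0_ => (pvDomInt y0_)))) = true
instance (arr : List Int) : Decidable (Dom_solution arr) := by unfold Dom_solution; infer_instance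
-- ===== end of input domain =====

-- B is an alternative decomposition: it converges each element independently and returns the
-- maximum per-element step count, instead of A's repeated whole-array passes with copy/compare.
-- Both A and B mutate arr in place in Python (to the same stabilized values); the equivalence
-- proved here is about the return value.

-- ===== PORT A =====

-- one transform of a single element (the body of A's for-loop; each arr[i] is read before it
-- is written, so the round is a pointwise map)
def pvStep (j : Int) : Int :=
  if 50 ≤ j ∧ PySem.Int.mod j 2 = 0 then PySem.Int.floordiv j 2
  else if j < 50 ∧ PySem.Int.mod j 2 ≠ 0 then j * 2 + 1
  else j

-- A's while-loop; the fuel is only a totality device: under Dom ∧ Pre the loop is proved to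
-- exit long before the fuel runs out (lemma pvLoopA_rounds below)
def pvLoopA : Nat → List Int → List Int → Int → Int
  | 0, _, _, ans => ans
  | fuel + 1, arr, arr2, ans =>
    if arr ≠ arr2 then pvLoopA fuel (arr.map pvStep) arr (ans + 1) else ans

def solution (arr : List Int) : Int := pvLoopA 4294967296 arr [] (-1)

-- ===== PORT B =====

-- termination measure for the per-element while-loop (proof device; the second conjunct of
-- pvCnt's guard is a totality device, always true when the loop terminates in Python)
def pvMu (j : Int) : Nat :=
  if pvStep j = j then 0 else if 50 ≤ j then j.toNat + 100 else (50 - j).toNat + 100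

-- B's inner while-loop: number of applications of pvStep until the value stops changing
def pvCnt (j : Int) : Nat :=
  if h : pvStep j ≠ j ∧ pvMu (pvStep j) < pvMu j then 1 + pvCnt (pvStep j) else 0
termination_by pvMu j
decreasing_by exact h.2

def solution_alt (arr : List Int) : Int :=
  if arr = [] then -1
  else arr.foldl (fun best j => max best ((pvCnt j : Int))) 0

-- ===== PRECONDITION & SPEC =====
-- Pre_ excludes exactly the inputs on which A never returns: if some element is odd and < -1,
-- the doubling branch runs forever (A's while-loop diverges; B diverges there too).
def Pre_solution (arr : List Int) : Prop := ∀ j ∈ arr, PySem.Int.mod j 2 = 1 → -1 ≤ j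
instance (arr : List Int) : Decidable (Pre_solution arr) := by unfold Pre_solution; infer_instance

def pvWitness_solution : List Int := [2147483648, 25, -1, -4, 0]

def Spec_solution (arr : List Int) (out : Int) : Prop := out = solution_alt arr
instance (arr : List Int) (out : Int) : Decidable (Spec_solution arr out) := by unfold Spec_solution; infer_instance

-- ===== CLAIM (what is proved, stated in full; the proofs are below) =====
def Claim_equal_solution : Prop := ∀ (arr : List Int), Dom_solution arr → Pre_solution arr → Spec_solution arr (solution arr)

-- ===== LEMMAS AND PROOFS =====

-- pvStep in terms of emod/ediv (divisor 2 is positive, so Python // and % agree with / and %)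
theorem pvStep_eq (j : Int) :
    pvStep j = if 50 ≤ j ∧ j % 2 = 0 then j / 2 else if j < 50 ∧ j % 2 ≠ 0 then j * 2 + 1 else j := by
  unfold pvStep
  rw [PySem.Int.mod_eq_emod_of_pos (by norm_num), PySem.Int.floordiv_eq_ediv_of_pos (by norm_num)]

-- the measure strictly decreases on a non-fixed step of an element satisfying Pre
theorem pvMu_dec (j : Int) (hp : j % 2 = 1 → -1 ≤ j) (hne : pvStep j ≠ j) :
    pvMu (pvStep j) < pvMu j := by
  simp only [pvMu, pvStep_eq] at *
  split_ifs at * <;> omega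

-- Pre is preserved by pvStep
theorem pvPre_step (j : Int) (hp : j % 2 = 1 → -1 ≤ j) : (pvStep j) % 2 = 1 → -1 ≤ pvStep j := by
  simp only [pvStep_eq]
  split_ifs <;> omega

theorem pvCnt_fix (j : Int) (h : pvStep j = j) : pvCnt j = 0 := by
  rw [pvCnt]; simp [h]

theorem pvCnt_succ (j : Int) (hp : j % 2 = 1 → -1 ≤ j) (hne : pvStep j ≠ j) :
    pvCnt j = pvCnt (pvStep j) + 1 := by
  rw [pvCnt, dif_pos ⟨hne, pvMu_dec j hp hne⟩]; omega

theorem pvCnt_pred (j : Int) (hp : j % 2 = 1 → -1 ≤ j) : pvCnt (pvStep j) = pvCnt j - 1 := by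
  by_cases h : pvStep j = j
  · rw [h, pvCnt_fix j h]
  · rw [pvCnt_succ j hp h]; omega

theorem pvCnt_le_mu (j : Int) : pvCnt j ≤ pvMu j := by
  fun_induction pvCnt j with
  | case1 j h ih => omega
  | case2 j h => omega

-- Nat-valued maximum of per-element counts
def pvN (arr : List Int) : Nat := arr.foldl (fun best j => max best (pvCnt j)) 0

theorem pvFold_cast (arr : List Int) : ∀ (m : Nat),
    arr.foldl (fun best j => max best ((pvCnt j : Int))) (m : Int)
      = ((arr.foldl (fun best j => max best (pvCnt j)) m : Nat) : Int) := by
  induction arr with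
  | nil => intro m; simp
  | cons a t ih => intro m; simp only [List.foldl_cons, ← Nat.cast_max, ih]

theorem pvFold_max_le (arr : List Int) : ∀ (m K : Nat), m ≤ K → (∀ j ∈ arr, pvCnt j ≤ K) →
    arr.foldl (fun best j => max best (pvCnt j)) m ≤ K := by
  induction arr with
  | nil => intro m K hm _; simpa using hm
  | cons a t ih =>
    intro m K hm hall
    simp only [List.foldl_cons]
    exact ih _ K (by have := hall a (by simp); omega) (fun j hj => hall j (by simp [hj]))

theorem pvFold_max_pos (arr : List Int) : ∀ (m : Nat),
    0 < arr.foldl (fun best j => max best (pvCnt j)) m → 0 < m ∨ ∃ j ∈ arr, 0 < pvCnt j := by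
  induction arr with
  | nil => intro m h; simp at h; omega
  | cons a t ih =>
    intro m h
    simp only [List.foldl_cons] at h
    rcases ih _ h with hmax | ⟨j, hj, hjp⟩
    · by_cases ha : 0 < pvCnt a
      · exact Or.inr ⟨a, by simp, ha⟩
      · left; omega
    · exact Or.inr ⟨j, by simp [hj], hjp⟩

theorem pvFold_init_le (arr : List Int) : ∀ (m : Nat),
    m ≤ arr.foldl (fun best j => max best (pvCnt j)) m := by
  induction arr with
  | nil => simp
  | cons a t ih => intro m; simp only [List.foldl_cons]; exact le_trans (by omega) (ih _)

theorem pvFold_max_ge (arr : List Int) (j : Int) (hj : j ∈ arr) : ∀ (m : Nat),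
    pvCnt j ≤ arr.foldl (fun best j => max best (pvCnt j)) m := by
  induction arr with
  | nil => simp at hj
  | cons a t ih =>
    intro m
    simp only [List.foldl_cons]
    rcases List.mem_cons.mp hj with rfl | hj'
    · exact le_trans (by omega) (pvFold_init_le t _)
    · exact ih hj' _

theorem pvFold_max_sub (arr : List Int) (hp : ∀ j ∈ arr, j % 2 = 1 → -1 ≤ j) : ∀ (m : Nat),
    (arr.map pvStep).foldl (fun best j => max best (pvCnt j)) (m - 1)
      = arr.foldl (fun best j => max best (pvCnt j)) m - 1 := by
  induction arr with
  | nil => intro m; simp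
  | cons a t ih =>
    intro m
    simp only [List.map_cons, List.foldl_cons]
    rw [pvCnt_pred a (hp a (by simp)),
        show max (m - 1) (pvCnt a - 1) = max m (pvCnt a) - 1 by omega]
    exact ih (fun j hj hodd => hp j (by simp [hj]) hodd) _

theorem pvMap_fix (arr : List Int) (h : ∀ j ∈ arr, pvStep j = j) : arr.map pvStep = arr := by
  induction arr with
  | nil => rfl
  | cons a t ih =>
    simp only [List.map_cons, h a (by simp), List.cons.injEq, true_and]
    exact ih (fun j hj => h j (by simp [hj]))

theorem pvMap_ne (arr : List Int) (j : Int) (hj : j ∈ arr) (hne : pvStep j ≠ j) :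
    arr.map pvStep ≠ arr := by
  intro h
  induction arr with
  | nil => simp at hj
  | cons a t ih =>
    simp only [List.map_cons, List.cons.injEq] at h
    rcases List.mem_cons.mp hj with rfl | hj'
    · exact hne h.1
    · exact ih hj' h.2

theorem pvLoopA_self (fuel : Nat) (arr : List Int) (ans : Int) : pvLoopA fuel arr arr ans = ans := by
  cases fuel <;> simp [pvLoopA]

-- the whole-array loop runs exactly (max per-element count) more rounds
theorem pvLoopA_rounds (n : Nat) : ∀ (fuel : Nat) (arr arr2 : List Int) (ans : Int),
    (∀ j ∈ arr, j % 2 = 1 → -1 ≤ j) → pvN arr = n → n ≤ fuel → arr ≠ arr2 →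
    pvLoopA (fuel + 1) arr arr2 ans = ans + 1 + (n : Int) := by
  induction n with
  | zero =>
    intro fuel arr arr2 ans hp hN _ hne
    have hfix : ∀ j ∈ arr, pvStep j = j := by
      intro j hj
      by_contra hne'
      have h1 := pvCnt_succ j (hp j hj) hne'
      have h2 : pvCnt j ≤ pvN arr := pvFold_max_ge arr j hj 0
      omega
    rw [pvLoopA, if_pos hne, pvMap_fix arr hfix, pvLoopA_self]
    simp
  | succ m ih =>
    intro fuel arr arr2 ans hp hN hle hne
    obtain ⟨j, hj, hjp⟩ : ∃ j ∈ arr, 0 < pvCnt j :=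
      (pvFold_max_pos arr 0 (by unfold pvN at hN; omega)).resolve_left (by omega)
    have hjne : pvStep j ≠ j := by
      intro h; rw [pvCnt_fix j h] at hjp; omega
    have hmapne : arr.map pvStep ≠ arr := pvMap_ne arr j hj hjne
    have hNm : pvN (arr.map pvStep) = m := by
      unfold pvN
      have := pvFold_max_sub arr hp 0
      simp only [Nat.zero_sub] at this
      unfold pvN at hN
      omega
    obtain ⟨f, rfl⟩ : ∃ f, fuel = f + 1 := ⟨fuel - 1, by omega⟩
    rw [pvLoopA, if_pos hne]
    rw [ih f (arr.map pvStep) arr (ans + 1)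
        (by intro j' hj'; obtain ⟨j0, hj0, rfl⟩ := List.mem_map.mp hj'; exact pvPre_step j0 (hp j0 hj0))
        hNm (by omega) hmapne]
    push_cast
    ring

-- ===== VERDICT (by name: the statement is the Claim_ definition above) =====
theorem solution_spec : Claim_equal_solution := by
  intro arr hdom hpre
  unfold Spec_solution solution solution_alt
  have hp : ∀ j ∈ arr, j % 2 = 1 → -1 ≤ j := by
    intro j hj
    have := hpre j hj
    rwa [PySem.Int.mod_eq_emod_of_pos (by norm_num)] at this
  by_cases he : arr = []
  · subst he
    rw [if_pos rfl, pvLoopA_self]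
  · rw [if_neg he]
    have hbound : pvN arr ≤ 4294967295 := by
      apply pvFold_max_le arr 0 _ (by omega)
      intro j hj
      have hd : pvDomInt j = true := by
        have := (List.all_eq_true).mp hdom j hj
        simpa using this
      have hdj : -2147483648 ≤ j ∧ j ≤ 2147483648 := by
        unfold pvDomInt at hd; exact of_decide_eq_true hd
      have h1 := pvCnt_le_mu j
      have h2 : pvMu j ≤ 2147483798 := by
        unfold pvMu; split_ifs <;> omega
      omega
    have := pvLoopA_rounds (pvN arr) 4294967295 arr [] (-1) hp rfl hbound he
    rw [show (4294967296 : Nat) = 4294967295 + 1 from rfl, this]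
    rw [show (0 : Int) = ((0 : Nat) : Int) from rfl, pvFold_cast arr 0]
    unfold pvN
    push_cast
    ring
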